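-- pv_equiv track=rewrite | github.com/AnkitPatel2024/Artificial-Intelligence-and-ML | homework2_UninformedSearch.py | isSolved_identical
-- ===== SOURCE A (Python) =====
-- def isSolved_identical(grid, n):
--     length = len(grid)
--     for i in range(length - n, length):
--         if grid[i] != 1:
--             return False
--     count = 0
--     for x in grid:
--         if x != 0:
--             count += 1
--     if count != n:
--         return False
--     return True
-- ===== SOURCE B (Python) =====
-- def isSolved_identical(grid, n):
--     if n < 0 or n > len(grid):
--         return False
--     return list(grid) == [0] * (len(grid) - n) + [1] * n
-- ===== Notes on version B (the rewrite author's own statement) =====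
-- stated objective: simpler
-- what changed: Replaces A's two validation scans (trailing-window check via indexing plus a nonzero count) with a single equality test against the constructed canonical solved grid [0]*(len(grid)-n) + [1]*n.
import Mathlib
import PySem

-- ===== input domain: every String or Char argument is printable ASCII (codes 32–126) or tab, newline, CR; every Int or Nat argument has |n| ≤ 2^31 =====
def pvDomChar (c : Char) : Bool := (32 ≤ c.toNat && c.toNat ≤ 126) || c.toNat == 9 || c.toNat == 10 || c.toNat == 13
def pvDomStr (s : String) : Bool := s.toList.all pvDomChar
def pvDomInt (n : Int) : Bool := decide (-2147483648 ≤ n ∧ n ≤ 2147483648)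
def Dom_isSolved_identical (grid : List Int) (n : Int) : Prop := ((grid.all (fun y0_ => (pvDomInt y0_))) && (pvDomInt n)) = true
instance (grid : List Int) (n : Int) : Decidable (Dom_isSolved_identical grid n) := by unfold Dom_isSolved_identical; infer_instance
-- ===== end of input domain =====

-- B replaces A's two validation scans with a single equality test against the canonical
-- solved grid (zeros followed by n ones); where A raises IndexError (0 < n, n > 2*len) B returns false.


-- ===== PORT A =====
def isSolved_identical (grid : List Int) (n : Int) : Bool :=
  let length : Int := grid.length
  if (PySem.List.pyRange (length - n) length 1).all
       (fun i => PySem.List.pyGetD grid i 0 == 1) then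
    let count : Int := grid.foldl (fun c x => if x ≠ 0 then c + 1 else c) 0
    if count ≠ n then false else true
  else false

-- ===== PORT B =====
def isSolved_identical_alt (grid : List Int) (n : Int) : Bool :=
  if n < 0 ∨ (grid.length : Int) < n then false
  else grid == List.replicate ((grid.length : Int) - n).toNat 0 ++ List.replicate n.toNat 1

-- ===== PRECONDITION & SPEC =====
-- Pre_ excludes exactly the inputs on which A raises IndexError: 0 < n and n > 2*len(grid)
-- (the first loop's start length-n then lies below -len(grid)).
def Pre_isSolved_identical (grid : List Int) (n : Int) : Prop :=
  0 < n → n ≤ 2 * (grid.length : Int)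
instance (grid : List Int) (n : Int) : Decidable (Pre_isSolved_identical grid n) := by
  unfold Pre_isSolved_identical; infer_instance
def pvWitness_isSolved_identical : List Int × Int := ([0, 1], 1)


def Spec_isSolved_identical (grid : List Int) (n : Int) (out : Bool) : Prop := out = isSolved_identical_alt grid n
instance (grid : List Int) (n : Int) (out : Bool) : Decidable (Spec_isSolved_identical grid n out) := by unfold Spec_isSolved_identical; infer_instance

-- ===== CLAIM (what is proved, stated in full; the proofs are below) =====
def Claim_equal_isSolved_identical : Prop := ∀ (grid : List Int) (n : Int), Dom_isSolved_identical grid n → Pre_isSolved_identical grid n → Spec_isSolved_identical grid n (isSolved_identical grid n)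

-- ===== LEMMAS AND PROOFS =====

-- A's counting loop computes the number of nonzero entries.
theorem count_foldl (grid : List Int) (c : Int) :
    grid.foldl (fun c x => if x ≠ 0 then c + 1 else c) c
      = c + (grid.countP (fun x => x ≠ 0) : Int) := by
  induction grid generalizing c with
  | nil => simp
  | cons x xs ih =>
      simp only [List.foldl_cons, List.countP_cons, ih]
      by_cases h : x = 0 <;> simp [h] <;> push_cast <;> ring

-- A's first loop, over indices [k, k+m) with k + m = length, checks that the last m entries are 1.
theorem range_all_eq_drop (grid : List Int) (k m : Nat) (hkm : k + m = grid.length) :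
    (PySem.List.pyRange (k : Int) ((k : Int) + (m : Int)) 1).all
        (fun i => PySem.List.pyGetD grid i 0 == 1)
      = (grid.drop k).all (fun x => x == 1) := by
  induction m generalizing k with
  | zero =>
      rw [PySem.List.pyRange_one_eq_nil (by omega)]
      simp [List.drop_eq_nil_of_le (by omega : grid.length ≤ k)]
  | succ m ih =>
      have hk : k < grid.length := by omega
      rw [PySem.List.pyRange_one_cons (by push_cast; omega)]
      have h1 : ((k : Int) + 1) = ((k + 1 : Nat) : Int) := by push_cast; ring
      have h2 : ((k : Int) + ((m + 1 : Nat) : Int)) = ((k + 1 : Nat) : Int) + (m : Int) := by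
        push_cast; ring
      rw [List.all_cons, h2, h1, ih (k + 1) (by omega)]
      have hg : PySem.List.pyGetD grid ((k : Nat) : Int) 0 = grid[k] := by
        rw [PySem.List.pyGetD_natCast]; exact List.getD_eq_getElem _ _ hk
      rw [List.drop_eq_getElem_cons hk, List.all_cons, hg]

theorem all_one_iff (xs : List Int) :
    xs.all (fun x => x == 1) = true ↔ xs = List.replicate xs.length 1 := by
  induction xs with
  | nil => simp
  | cons x xs ih => simp [List.replicate_succ, ih]

theorem countP_zero_iff (xs : List Int) :
    xs.countP (fun x => decide (x ≠ 0)) = 0 ↔ xs = List.replicate xs.length 0 := by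
  rw [List.countP_eq_zero, List.eq_replicate_iff]
  simp

-- B's equality test, for 0 ≤ n ≤ length, is the conjunction of A's two checks.
theorem alt_iff (grid : List Int) (k m : Nat) (hkm : k + m = grid.length) :
    (grid = List.replicate k 0 ++ List.replicate m 1)
      ↔ (grid.drop k = List.replicate m 1 ∧
         grid.countP (fun x => decide (x ≠ 0)) = m) := by
  constructor
  · intro h
    subst h
    constructor
    · rw [List.drop_append_of_le_length (by simp)]
      simp
    · simp [List.countP_append, List.countP_replicate]
  · rintro ⟨hdrop, hcount⟩
    have hsplit : grid = grid.take k ++ grid.drop k := (List.take_append_drop k grid).symm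
    have htakelen : (grid.take k).length = k := by
      rw [List.length_take]; omega
    have hcnt2 : grid.countP (fun x => decide (x ≠ 0))
        = (grid.take k).countP (fun x => decide (x ≠ 0)) + m := by
      conv_lhs => rw [hsplit]
      rw [List.countP_append, hdrop]
      simp [List.countP_replicate]
    have htake0 : (grid.take k).countP (fun x => decide (x ≠ 0)) = 0 := by omega
    have := (countP_zero_iff _).mp htake0
    rw [htakelen] at this
    conv_lhs => rw [hsplit]
    rw [this, hdrop]

-- ===== VERDICT (by name: the statement is the Claim_ definition above) =====
theorem isSolved_identical_spec : Claim_equal_isSolved_identical := by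
  intro grid n _ hpre
  unfold Spec_isSolved_identical isSolved_identical isSolved_identical_alt
  simp only []
  set L : Nat := grid.length with hL
  by_cases hn : 0 < n
  · have h2L : n ≤ 2 * (L : Int) := hpre hn
    by_cases hnL : n ≤ (L : Int)
    · -- main case: 0 < n ≤ L
      set m : Nat := n.toNat with hm
      have hmn : (m : Int) = n := Int.toNat_of_nonneg (by omega)
      set k : Nat := L - m with hk
      have hmL : m ≤ L := by omega
      have hkm : k + m = L := by omega
      have hcast : (L : Int) - n = (k : Int) := by push_cast; omega
      have hLsplit : (L : Int) = (k : Int) + (m : Int) := by push_cast; omega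
      rw [if_neg (show ¬(n < 0 ∨ (L : Int) < n) by omega)]
      rw [hcast, count_foldl, Int.toNat_natCast]
      conv_lhs => rw [hLsplit]
      rw [range_all_eq_drop grid k m hkm]
      have hdlen : (grid.drop k).length = m := by rw [List.length_drop]; omega
      have halt := alt_iff grid k m hkm
      by_cases hall : (grid.drop k).all (fun x => x == 1) = true
      · rw [hall, if_pos rfl]
        have hdrop : grid.drop k = List.replicate m 1 := by
          have := (all_one_iff (grid.drop k)).mp hall
          rwa [hdlen] at this
        by_cases hc : (0 : Int) + (grid.countP (fun x => x ≠ 0) : Int) ≠ n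
        · rw [if_pos hc]
          have hne : grid ≠ List.replicate k 0 ++ List.replicate m 1 := by
            intro heq
            have := (halt.mp heq).2
            apply hc
            rw [this]; omega
          simp [hne]
        · rw [if_neg hc]
          push_neg at hc
          have hcount : grid.countP (fun x => decide (x ≠ 0)) = m := by
            have : (grid.countP (fun x => decide (x ≠ 0)) : Int) = n := by
              rw [← hc]; ring
            omega
          have heq : grid = List.replicate k 0 ++ List.replicate m 1 :=
            halt.mpr ⟨hdrop, hcount⟩
          simp [heq]
      · simp only [hall, Bool.false_eq_true, if_false]
        have hne : grid ≠ List.replicate k 0 ++ List.replicate m 1 := by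
          intro heq
          apply hall
          rw [(halt.mp heq).1]
          simp
        simp [hne]
    · -- L < n ≤ 2L: the nonzero count is ≤ L < n, so A = false; B = false by length mismatch
      push_neg at hnL
      rw [count_foldl]
      have hcle : grid.countP (fun x => decide (x ≠ 0)) ≤ L := List.countP_le_length
      have hc : (0 : Int) + (grid.countP (fun x => x ≠ 0) : Int) ≠ n := by
        have : (grid.countP (fun x => decide (x ≠ 0)) : Int) ≤ (L : Int) := by exact_mod_cast hcle
        omega
      rw [if_pos (Or.inr hnL)]
      split_ifs <;> simp_all
  · -- n ≤ 0: range empty; count = n impossible for n < 0, and for n = 0 both test all-zero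
    push_neg at hn
    rw [PySem.List.pyRange_one_eq_nil (by omega), count_foldl]
    simp only [List.all_nil, if_pos rfl]
    by_cases hn0 : n = 0
    · subst hn0
      rw [if_neg (show ¬((0:Int) < 0 ∨ (L : Int) < 0) by omega)]
      simp only [Int.toNat_zero, List.replicate_zero, List.append_nil, sub_zero]
      have hLt : ((L : Int)).toNat = L := by omega
      rw [hLt]
      by_cases hz : grid.countP (fun x => decide (x ≠ 0)) = 0
      · have heq := (countP_zero_iff grid).mp hz
        rw [← hL] at heq
        have hc : ¬ ((0 : Int) + (grid.countP (fun x => x ≠ 0) : Int) ≠ 0) := by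
          omega
        rw [if_neg hc]
        exact (beq_iff_eq.mpr heq).symm
      · have hne : grid ≠ List.replicate L 0 := by
          intro heq
          apply hz
          rw [heq] at hz ⊢
          simp [List.countP_replicate]
        have hc : (0 : Int) + (grid.countP (fun x => x ≠ 0) : Int) ≠ 0 := by
          intro h
          apply hz
          omega
        rw [if_pos hc]
        simp [hne]
    · -- n < 0: count ≥ 0 > n so A = false; B = false by its guard
      have hc : (0 : Int) + (grid.countP (fun x => x ≠ 0) : Int) ≠ n := by
        have : (0 : Int) ≤ (grid.countP (fun x => decide (x ≠ 0)) : Int) := by positivity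
        omega
      rw [if_pos hc, if_pos (Or.inl (by omega : n < 0))]
      rfl
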